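-- pv_equiv track=rewrite | github.com/nlutala/data-structures-and-algorithms-gg | arrays/level1/sort_an_array_of_zeros.py | sort_array_012
-- ===== SOURCE A (Python) =====
-- def sort_array_012(array: list) -> int:
--     """
--     Given an array A[] consisting of only 0s, 1s, and 2s. The task is to sort
--     the array, i.e., put all 0s first, then all 1s and all 2s in last.
--
--     :param - array (list)\n
--     :param - x (int)\n
--
--     returns the number of the number x in the array
--     """
--     # My thoughts is that this problem is the same as sorting something in
--     # ascending order
--
--     new_array = []
--     original_array = array.copy()
--
--     while len(original_array) != 0:
--         smallest = original_array[0]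
--
--         for value in original_array:
--             smallest = value if value < smallest else smallest
--
--         new_array.append(smallest)
--         original_array.remove(smallest)
--
--     return new_array
-- ===== SOURCE B (Python) =====
-- def sort_array_012(array: list) -> int:
--     """Sort the array ascending (all 0s, then 1s, then 2s when restricted to 0/1/2)."""
--     return sorted(array)
-- ===== Notes on version B (the rewrite author's own statement) =====
-- stated objective: idiomatic
-- what changed: Replaces the quadratic selection sort (repeated min-scan plus list.remove) with a single call to Python's built-in sorted().
import Mathlib
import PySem

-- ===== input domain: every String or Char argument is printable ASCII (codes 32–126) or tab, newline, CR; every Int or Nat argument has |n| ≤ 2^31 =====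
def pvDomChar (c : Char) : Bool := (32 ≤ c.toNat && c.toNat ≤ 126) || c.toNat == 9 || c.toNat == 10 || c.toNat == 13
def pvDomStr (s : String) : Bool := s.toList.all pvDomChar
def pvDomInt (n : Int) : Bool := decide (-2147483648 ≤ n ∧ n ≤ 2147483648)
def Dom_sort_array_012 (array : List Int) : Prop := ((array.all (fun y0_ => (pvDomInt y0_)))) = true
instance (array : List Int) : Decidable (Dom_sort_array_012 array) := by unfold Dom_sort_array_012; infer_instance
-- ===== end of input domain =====

-- B replaces A's quadratic selection sort (repeated min-scan + remove) with one built-in sorted() call.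

-- ===== PORT A =====
-- termination helper for the while-loop: a successful remove? shortens the list
theorem pvRemoveLen {xs r : List Int} {v : Int} (h : PySem.List.remove? xs v = some r) :
    r.length < xs.length := by
  have hm : v ∈ xs := by
    by_contra hv
    rw [(PySem.List.remove?_eq_none_iff xs v).mpr hv] at h
    simp at h
  rw [PySem.List.remove?_eq_some_erase xs v hm] at h
  cases h
  have h1 : (xs.erase v).length = xs.length - 1 := List.length_erase_of_mem hm
  have h2 : 0 < xs.length := List.length_pos_of_mem hm
  omega

-- the 'while len(original_array) != 0' loop of A
def pvSortLoop (newArr orig : List Int) : List Int :=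
  match horig : orig with
  | [] => newArr
  | v :: t =>
    -- smallest = original_array[0]; for value in original_array: smallest = value if value < smallest else smallest
    let smallest := (v :: t).foldl (fun s w => if w < s then w else s) v
    match hr : PySem.List.remove? (v :: t) smallest with
    | some rest => pvSortLoop (newArr ++ [smallest]) rest
    | none => newArr   -- unreachable: smallest is always a member (Python's ValueError never fires)
termination_by orig.length
decreasing_by simpa [horig] using pvRemoveLen hr

def sort_array_012 (array : List Int) : List Int :=
  -- new_array = []; original_array = array.copy(); while-loop; return new_array
  pvSortLoop [] array

-- ===== PORT B =====
def sort_array_012_alt (array : List Int) : List Int :=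
  PySem.List.sorted array (fun x => x) false

-- ===== PRECONDITION & SPEC =====
def Spec_sort_array_012 (array : List Int) (out : List Int) : Prop := out = sort_array_012_alt array
instance (array : List Int) (out : List Int) : Decidable (Spec_sort_array_012 array out) := by unfold Spec_sort_array_012; infer_instance

-- ===== CLAIM (what is proved, stated in full; the proofs are below) =====
def Claim_equal_sort_array_012 : Prop := ∀ (array : List Int), Dom_sort_array_012 array → Spec_sort_array_012 array (sort_array_012 array)

-- ===== LEMMAS AND PROOFS =====

-- the fold computing 'smallest' returns a member of start::l that is ≤ start and ≤ every element of l
theorem pvMinFold (l : List Int) (a : Int) :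
    (l.foldl (fun s w => if w < s then w else s) a ∈ a :: l) ∧
    (l.foldl (fun s w => if w < s then w else s) a ≤ a) ∧
    (∀ x ∈ l, l.foldl (fun s w => if w < s then w else s) a ≤ x) := by
  induction l generalizing a with
  | nil => simp
  | cons b t ih =>
    have h := ih (if b < a then b else a)
    simp only [List.foldl_cons]
    refine ⟨?_, ?_, ?_⟩
    · rcases List.mem_cons.mp h.1 with h1 | h1
      · rw [h1]; split_ifs <;> simp
      · simp [h1]
    · exact le_trans h.2.1 (by split_ifs with hba <;> omega)
    · intro x hx
      rcases List.mem_cons.mp hx with rfl | hx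
      · exact le_trans h.2.1 (by split_ifs with hba <;> omega)
      · exact h.2.2 x hx

-- loop invariant: the selection loop appends sorted(orig) to the accumulator
theorem pvLoop_eq (orig : List Int) (newArr : List Int) :
    pvSortLoop newArr orig = newArr ++ PySem.List.sorted orig (fun x => x) false := by
  match orig with
  | [] =>
      have hnil : PySem.List.sorted ([] : List Int) (fun x => x) false = [] := rfl
      rw [pvSortLoop, hnil, List.append_nil]
  | v :: t =>
    have hmin := pvMinFold (v :: t) v
    set m := (v :: t).foldl (fun s w => if w < s then w else s) v with hm
    have hmem : m ∈ v :: t := by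
      rcases List.mem_cons.mp hmin.1 with h1 | h1
      · rw [h1]; exact List.mem_cons_self
      · exact h1
    have hle : ∀ x ∈ v :: t, m ≤ x := hmin.2.2
    have hr : PySem.List.remove? (v :: t) m = some ((v :: t).erase m) :=
      PySem.List.remove?_eq_some_erase (v :: t) m hmem
    have hlen : ((v :: t).erase m).length < (v :: t).length := by
      rw [List.length_erase_of_mem hmem]
      exact Nat.sub_lt (List.length_pos_of_mem hmem) one_pos
    have hstep : pvSortLoop newArr (v :: t)
        = pvSortLoop (newArr ++ [m]) ((v :: t).erase m) := by
      rw [pvSortLoop]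
      simp only [← hm]
      split
      · rename_i rest hrest
        rw [hr] at hrest
        cases hrest
        rfl
      · rename_i hnone
        rw [hr] at hnone
        cases hnone
    have hsorted : PySem.List.sorted (v :: t) (fun x => x) false
        = m :: PySem.List.sorted ((v :: t).erase m) (fun x => x) false := by
      refine PySem.List.sorted_id_eq_of_perm_of_pairwise _ _ ?_ ?_
      · exact ((PySem.List.sorted_perm _ _ _).cons m).trans
          (List.perm_cons_erase hmem).symm
      · refine List.pairwise_cons.mpr ⟨?_, ?_⟩
        · intro y hy
          have : y ∈ (v :: t).erase m :=
            (PySem.List.mem_sorted _ _ _ _).mp hy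
          exact hle y (List.mem_of_mem_erase this)
        · simpa using PySem.List.sorted_pairwise ((v :: t).erase m) (fun x => x)
    rw [hstep, pvLoop_eq ((v :: t).erase m) (newArr ++ [m]), hsorted, List.append_assoc]
    rfl
termination_by orig.length
decreasing_by simpa [hm] using hlen

-- ===== VERDICT (by name: the statement is the Claim_ definition above) =====
theorem sort_array_012_spec : Claim_equal_sort_array_012 := by
  intro array _
  unfold Spec_sort_array_012 sort_array_012 sort_array_012_alt
  simpa using pvLoop_eq array []
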